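-- pv_equiv track=rewrite | github.com/JanVanCau/tijdloze | tijdloze_generate.py | paragraph
-- ===== SOURCE A (Python) =====
-- def paragraph(text, max_lines=6):
--
--     s = 0
--     positions = []
--     p_text = text
--
--     for i in range(1, len(text)-1):
--         if text[i:i+1] == "\n":
--             s += 1
--             if s % max_lines == 0:
--                 positions.append(i+1)
--
--     for pos in sorted(positions, reverse=True):
--         p_text = p_text[:pos] + '\n' + p_text[pos:]
--
--     return p_text
-- ===== SOURCE B (Python) =====
-- def paragraph(text, max_lines=6):
--     n = len(text)
--     out = []
--     s = 0
--     for i, ch in enumerate(text):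
--         out.append(ch)
--         if ch == '\n' and 0 < i < n - 1:
--             s += 1
--             if s % max_lines == 0:
--                 out.append('\n')
--     return ''.join(out)
-- ===== Notes on version B (the rewrite author's own statement) =====
-- stated objective: faster
-- what changed: A scans indices to collect insertion positions and then re-slices the whole string once per inserted newline (descending); B does one left-to-right pass over enumerate(text), appending each character and emitting the extra newline immediately.
import Mathlib
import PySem

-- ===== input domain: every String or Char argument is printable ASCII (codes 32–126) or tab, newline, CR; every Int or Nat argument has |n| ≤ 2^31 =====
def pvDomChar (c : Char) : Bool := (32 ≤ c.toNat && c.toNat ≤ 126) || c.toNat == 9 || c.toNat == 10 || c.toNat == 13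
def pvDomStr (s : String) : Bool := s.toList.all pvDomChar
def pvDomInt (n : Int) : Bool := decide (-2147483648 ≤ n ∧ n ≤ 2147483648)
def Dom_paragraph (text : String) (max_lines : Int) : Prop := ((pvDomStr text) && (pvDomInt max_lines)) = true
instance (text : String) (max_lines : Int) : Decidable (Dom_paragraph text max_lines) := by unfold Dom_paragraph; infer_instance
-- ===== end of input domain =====

-- B replaces A's two-phase collect-positions-then-splice (repeated string slicing) by a single
-- left-to-right pass that emits the extra newline immediately.

-- ===== PORT A =====
-- loop body of A's first pass (count newlines at interior indices, record insertion positions)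
def bodyA (max_lines : Int) (cs : List Char) (st : Int × List Int) (i : Int) : Int × List Int :=
  if PySem.List.slice cs (some i) (some (i + 1)) = ['\n'] then
    let s := st.1 + 1
    if PySem.Int.mod s max_lines = 0 then (s, st.2 ++ [i + 1]) else (s, st.2)
  else st

-- loop body of A's second pass: p_text = p_text[:pos] + '\n' + p_text[pos:]
def spliceA (t : List Char) (pos : Int) : List Char :=
  PySem.List.slice t none (some pos) ++ '\n' :: PySem.List.slice t (some pos) none

def paragraph (text : String) (max_lines : Int) : String :=
  let cs := text.toList
  let n : Int := PySem.Str.len text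
  let fin := (PySem.List.pyRange 1 (n - 1) 1).foldl (bodyA max_lines cs) (0, [])
  let p := (PySem.List.sorted fin.2 (fun x => x) true).foldl spliceA cs
  String.ofList p

-- ===== PORT B =====
-- loop body of B's single pass (append char; on a counted newline maybe append an extra one)
def bodyB (max_lines n : Int) (st : Int × List Char) (p : Int × Char) : Int × List Char :=
  let out := st.2 ++ [p.2]
  if p.2 = '\n' ∧ 0 < p.1 ∧ p.1 < n - 1 then
    let s := st.1 + 1
    if PySem.Int.mod s max_lines = 0 then (s, out ++ ['\n']) else (s, out)
  else (st.1, out)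

def paragraph_alt (text : String) (max_lines : Int) : String :=
  let cs := text.toList
  let n : Int := PySem.Str.len text
  let fin := (PySem.List.enumerate cs 0).foldl (bodyB max_lines n) (0, [])
  String.ofList fin.2

-- ===== PRECONDITION & SPEC =====
-- Pre_ excludes exactly the inputs where Python A raises ZeroDivisionError (max_lines = 0 while
-- some newline occurs at an interior index); B raises there as well.
def Pre_paragraph (text : String) (max_lines : Int) : Prop :=
  max_lines ≠ 0 ∨ ((text.toList.drop 1).dropLast.all (fun c => c ≠ '\n')) = true
instance (text : String) (max_lines : Int) : Decidable (Pre_paragraph text max_lines) := by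
  unfold Pre_paragraph; infer_instance

def pvWitness_paragraph : String × Int := ("a\nb\nc\nd", 2)

def Spec_paragraph (text : String) (max_lines : Int) (out : String) : Prop := out = paragraph_alt text max_lines
instance (text : String) (max_lines : Int) (out : String) : Decidable (Spec_paragraph text max_lines out) := by unfold Spec_paragraph; infer_instance

-- ===== CLAIM (what is proved, stated in full; the proofs are below) =====
def Claim_equal_paragraph : Prop := ∀ (text : String) (max_lines : Int), Dom_paragraph text max_lines → Pre_paragraph text max_lines → Spec_paragraph text max_lines (paragraph text max_lines)

-- ===== LEMMAS AND PROOFS =====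

-- positions recorded by A's first loop, as a recursion over (index, char) pairs
def posF (m nn : Int) : List (Int × Char) → Int → List Int
  | [], _ => []
  | p :: r, s =>
    if p.2 = '\n' ∧ 0 < p.1 ∧ p.1 < nn - 1 then
      if PySem.Int.mod (s + 1) m = 0 then (p.1 + 1) :: posF m nn r (s + 1)
      else posF m nn r (s + 1)
    else posF m nn r s

-- B's output, as a recursion over (index, char) pairs
def go (m nn : Int) : List (Int × Char) → Int → List Char
  | [], _ => []
  | p :: r, s =>
    if p.2 = '\n' ∧ 0 < p.1 ∧ p.1 < nn - 1 then
      if PySem.Int.mod (s + 1) m = 0 then p.2 :: '\n' :: go m nn r (s + 1)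
      else p.2 :: go m nn r (s + 1)
    else p.2 :: go m nn r s

-- A's first loop body re-expressed over (index, char) pairs
def bodyP (m nn : Int) (st : Int × List Int) (p : Int × Char) : Int × List Int :=
  if p.2 = '\n' ∧ 0 < p.1 ∧ p.1 < nn - 1 then
    let s := st.1 + 1
    if PySem.Int.mod s m = 0 then (s, st.2 ++ [p.1 + 1]) else (s, st.2)
  else st

-- bodyP precomposed with the indexed lookup (A's guarded range body)
def gP (m : Int) (cs : List Char) (st : Int × List Int) (i : Int) : Int × List Int :=
  bodyP m (cs.length : Int) st (i, PySem.List.pyGetD cs i ' ')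

-- the second pass's step written with take/drop
def insAt (t : List Char) (pos : Int) : List Char :=
  t.take pos.toNat ++ '\n' :: t.drop pos.toNat

-- insert '\n' before every (absolute) position in P, walking t from absolute index b
def ins : List Char → Nat → List Int → List Char
  | [], _, _ => []
  | c :: r, b, P => if (b : Int) ∈ P then '\n' :: c :: ins r (b + 1) P else c :: ins r (b + 1) P

theorem ins_nil : ∀ (t : List Char) (b : Nat), ins t b [] = t := by
  intro t
  induction t with
  | nil => intro b; rfl
  | cons c r ih => intro b; simp [ins, ih]

theorem ins_cons_lt : ∀ (t : List Char) (b : Nat) (x : Int) (P : List Int), x < (b : Int) →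
    ins t b (x :: P) = ins t b P := by
  intro t
  induction t with
  | nil => intro b x P _; rfl
  | cons c r ih =>
    intro b x P hx
    have hbx : ¬ ((b : Int) = x) := by omega
    have hr := ih (b + 1) x P (by push_cast; omega)
    by_cases hb : (b : Int) ∈ P
    · simp [ins, List.mem_cons, hbx, hb, hr]
    · simp [ins, List.mem_cons, hbx, hb, hr]

theorem bodyB_step_tm (m nn s : Int) (acc : List Char) (i : Int) (c : Char)
    (h : c = '\n' ∧ 0 < i ∧ i < nn - 1) (hm : PySem.Int.mod (s + 1) m = 0) :
    bodyB m nn (s, acc) (i, c) = (s + 1, (acc ++ [c]) ++ ['\n']) := by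
  simp [bodyB, h, hm]

theorem bodyB_step_tf (m nn s : Int) (acc : List Char) (i : Int) (c : Char)
    (h : c = '\n' ∧ 0 < i ∧ i < nn - 1) (hm : ¬ PySem.Int.mod (s + 1) m = 0) :
    bodyB m nn (s, acc) (i, c) = (s + 1, acc ++ [c]) := by
  simp [bodyB, h, hm]

theorem bodyB_step_f (m nn s : Int) (acc : List Char) (i : Int) (c : Char)
    (h : ¬ (c = '\n' ∧ 0 < i ∧ i < nn - 1)) :
    bodyB m nn (s, acc) (i, c) = (s, acc ++ [c]) := by
  simp [bodyB, h]

theorem B_fold (m nn : Int) : ∀ (l : List (Int × Char)) (s : Int) (acc : List Char),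
    (l.foldl (bodyB m nn) (s, acc)).2 = acc ++ go m nn l s := by
  intro l
  induction l with
  | nil => intro s acc; simp [go]
  | cons p r ih =>
    intro s acc
    rcases p with ⟨i, c⟩
    rw [List.foldl_cons]
    by_cases h : c = '\n' ∧ 0 < i ∧ i < nn - 1
    · by_cases hm : PySem.Int.mod (s + 1) m = 0
      · rw [bodyB_step_tm m nn s acc i c h hm, ih]
        simp [go, h, hm]
      · rw [bodyB_step_tf m nn s acc i c h hm, ih]
        simp [go, h, hm]
    · rw [bodyB_step_f m nn s acc i c h, ih]
      simp [go, h]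

theorem bodyP_step_tm (m nn s : Int) (acc : List Int) (i : Int) (c : Char)
    (h : c = '\n' ∧ 0 < i ∧ i < nn - 1) (hm : PySem.Int.mod (s + 1) m = 0) :
    bodyP m nn (s, acc) (i, c) = (s + 1, acc ++ [i + 1]) := by
  simp [bodyP, h, hm]

theorem bodyP_step_tf (m nn s : Int) (acc : List Int) (i : Int) (c : Char)
    (h : c = '\n' ∧ 0 < i ∧ i < nn - 1) (hm : ¬ PySem.Int.mod (s + 1) m = 0) :
    bodyP m nn (s, acc) (i, c) = (s + 1, acc) := by
  simp [bodyP, h, hm]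

theorem bodyP_step_f (m nn s : Int) (acc : List Int) (i : Int) (c : Char)
    (h : ¬ (c = '\n' ∧ 0 < i ∧ i < nn - 1)) :
    bodyP m nn (s, acc) (i, c) = (s, acc) := by
  simp [bodyP, h]

theorem A_fold (m nn : Int) : ∀ (l : List (Int × Char)) (s : Int) (acc : List Int),
    (l.foldl (bodyP m nn) (s, acc)).2 = acc ++ posF m nn l s := by
  intro l
  induction l with
  | nil => intro s acc; simp [posF]
  | cons p r ih =>
    intro s acc
    rcases p with ⟨i, c⟩
    rw [List.foldl_cons]
    by_cases h : c = '\n' ∧ 0 < i ∧ i < nn - 1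
    · by_cases hm : PySem.Int.mod (s + 1) m = 0
      · rw [bodyP_step_tm m nn s acc i c h hm, ih]
        simp [posF, h, hm]
      · rw [bodyP_step_tf m nn s acc i c h hm, ih]
        simp [posF, h, hm]
    · rw [bodyP_step_f m nn s acc i c h, ih]
      simp [posF, h]

theorem posF_lb (m nn : Int) : ∀ (sub : List Char) (b s p : Int),
    p ∈ posF m nn (PySem.List.enumerate sub b) s → b + 1 ≤ p := by
  intro sub
  induction sub with
  | nil => intro b s p hp; simp [PySem.List.enumerate_nil, posF] at hp
  | cons c r ih =>
    intro b s p hp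
    rw [PySem.List.enumerate_cons] at hp
    by_cases h : c = '\n' ∧ 0 < b ∧ b < nn - 1
    · by_cases hm : PySem.Int.mod (s + 1) m = 0
      · simp only [posF, h, hm, and_self, if_true, ite_true] at hp
        rcases List.mem_cons.mp hp with h1 | h1
        · omega
        · have := ih (b + 1) (s + 1) p h1; omega
      · simp only [posF, h, hm, and_self, if_true, ite_true, if_false, ite_false] at hp
        have := ih (b + 1) (s + 1) p hp; omega
    · simp only [posF, h, if_false, ite_false] at hp
      have := ih (b + 1) s p hp; omega

theorem posF_ub (m nn : Int) : ∀ (l : List (Int × Char)) (s p : Int),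
    p ∈ posF m nn l s → p < nn := by
  intro l
  induction l with
  | nil => intro s p hp; simp [posF] at hp
  | cons q r ih =>
    intro s p hp
    by_cases h : q.2 = '\n' ∧ 0 < q.1 ∧ q.1 < nn - 1
    · obtain ⟨h1, h2, h3⟩ := h
      by_cases hm : PySem.Int.mod (s + 1) m = 0
      · simp only [posF, h1, h2, h3, and_self, if_true, ite_true, hm] at hp
        rcases List.mem_cons.mp hp with h4 | h4
        · omega
        · exact ih _ _ h4
      · simp only [posF, h1, h2, h3, and_self, if_true, ite_true, hm, if_false, ite_false] at hp
        exact ih _ _ hp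
    · simp only [posF, h, if_false, ite_false] at hp
      exact ih _ _ hp

theorem posF_pairwise (m nn : Int) : ∀ (sub : List Char) (b s : Int),
    (posF m nn (PySem.List.enumerate sub b) s).Pairwise (· < ·) := by
  intro sub
  induction sub with
  | nil => intro b s; simp [PySem.List.enumerate_nil, posF]
  | cons c r ih =>
    intro b s
    rw [PySem.List.enumerate_cons]
    by_cases h : c = '\n' ∧ 0 < b ∧ b < nn - 1
    · by_cases hm : PySem.Int.mod (s + 1) m = 0
      · simp only [posF, h, hm, and_self, if_true, ite_true]
        refine List.pairwise_cons.mpr ⟨?_, ih (b + 1) (s + 1)⟩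
        intro p hp
        have := posF_lb m nn r (b + 1) (s + 1) p hp
        omega
      · simp only [posF, h, hm, and_self, if_true, ite_true, if_false, ite_false]
        exact ih (b + 1) (s + 1)
    · simp only [posF, h, if_false, ite_false]
      exact ih (b + 1) s

theorem ins_cons_notmem (c : Char) (r : List Char) (b : Nat) (P : List Int)
    (h : ¬ ((b : Int) ∈ P)) : ins (c :: r) b P = c :: ins r (b + 1) P := by
  simp [ins, h]

theorem ins_cons_mem (c : Char) (r : List Char) (b : Nat) (P : List Int)
    (h : (b : Int) ∈ P) : ins (c :: r) b P = '\n' :: c :: ins r (b + 1) P := by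
  simp [ins, h]

theorem go_ins (m nn : Int) : ∀ (sub : List Char) (b : Nat) (s : Int),
    ((b : Int) + sub.length = nn) →
    ins sub b (posF m nn (PySem.List.enumerate sub (b : Int)) s)
      = go m nn (PySem.List.enumerate sub (b : Int)) s := by
  intro sub
  induction sub with
  | nil => intro b s _; simp [PySem.List.enumerate_nil, posF, go, ins]
  | cons c r ih =>
    intro b s hn
    rw [PySem.List.enumerate_cons]
    simp only [List.length_cons] at hn
    have hcast : ((b + 1 : Nat) : Int) = (b : Int) + 1 := by push_cast; ring
    simp only [posF, go]
    split_ifs with h hm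
    · have hc : c = '\n' := h.1
      have hx2 : (b : Int) < nn - 1 := h.2.2
      subst hc
      cases r with
      | nil =>
        exfalso
        simp only [List.length_nil] at hn
        push_cast at hn
        omega
      | cons c' r' =>
        have hlb : ∀ p ∈ posF m nn (PySem.List.enumerate (c' :: r') ((b : Int) + 1)) (s + 1),
            (b : Int) + 2 ≤ p := by
          intro p hp
          have := posF_lb m nn (c' :: r') ((b : Int) + 1) (s + 1) p hp
          omega
        have hb0 : ¬ ((b : Int) ∈ ((b : Int) + 1) ::
            posF m nn (PySem.List.enumerate (c' :: r') ((b : Int) + 1)) (s + 1)) := by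
          intro hmem
          rcases List.mem_cons.mp hmem with h1 | h1
          · omega
          · have := hlb _ h1; omega
        have hb2 : ¬ (((b + 1 : Nat) : Int) ∈
            posF m nn (PySem.List.enumerate (c' :: r') ((b : Int) + 1)) (s + 1)) := by
          rw [hcast]
          intro hmem
          have := hlb _ hmem
          omega
        have hmem1 : ((b + 1 : Nat) : Int) ∈ ((b : Int) + 1) ::
            posF m nn (PySem.List.enumerate (c' :: r') ((b : Int) + 1)) (s + 1) := by
          rw [hcast]
          exact List.mem_cons_self
        have ihr := ih (b + 1) (s + 1) (by push_cast at hn ⊢; omega)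
        rw [hcast] at ihr
        rw [ins_cons_notmem _ _ _ _ hb0, ins_cons_mem _ _ _ _ hmem1,
            ins_cons_lt _ (b + 1 + 1) _ _ (by push_cast; omega),
            ← ins_cons_notmem c' r' (b + 1) _ hb2]
        rw [ihr]
    · have hb0 : ¬ ((b : Int) ∈ posF m nn (PySem.List.enumerate r ((b : Int) + 1)) (s + 1)) := by
        intro hmem
        have := posF_lb m nn r ((b : Int) + 1) (s + 1) _ hmem
        omega
      have ihr := ih (b + 1) (s + 1) (by push_cast at hn ⊢; omega)
      rw [hcast] at ihr
      rw [ins_cons_notmem _ _ _ _ hb0, ihr]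
    · have hb0 : ¬ ((b : Int) ∈ posF m nn (PySem.List.enumerate r ((b : Int) + 1)) s) := by
        intro hmem
        have := posF_lb m nn r ((b : Int) + 1) s _ hmem
        omega
      have ihr := ih (b + 1) s (by push_cast at hn ⊢; omega)
      rw [hcast] at ihr
      rw [ins_cons_notmem _ _ _ _ hb0, ihr]

theorem insertAt_ins : ∀ (t : List Char) (b : Nat) (k : Nat) (ps : List Int),
    (∀ q ∈ ps, (b : Int) + k < q) → k < t.length →
    (ins t b ps).take k ++ '\n' :: (ins t b ps).drop k = ins t b (((b : Int) + k) :: ps) := by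
  intro t
  induction t with
  | nil => intro b k ps _ hk; simp at hk
  | cons c r ih =>
    intro b k ps hqs hk
    have hbnot : ¬ ((b : Int) ∈ ps) := by
      intro hb; have := hqs _ hb; push_cast at this; omega
    cases k with
    | zero =>
      have e2 : ins (c :: r) b (((b : Int) + (0 : Nat)) :: ps)
          = '\n' :: c :: ins r (b + 1) (((b : Int) + (0 : Nat)) :: ps) := by
        have : (b : Int) ∈ ((b : Int) + (0 : Nat)) :: ps := by
          push_cast; simp
        simp [ins, this]
      have e3 : ins r (b + 1) (((b : Int) + (0 : Nat)) :: ps) = ins r (b + 1) ps := by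
        apply ins_cons_lt; push_cast; omega
      have e1 : ins (c :: r) b ps = c :: ins r (b + 1) ps := by simp [ins, hbnot]
      rw [e1, e2, e3]
      simp
    | succ k' =>
      have hb1 : ¬ ((b : Int) ∈ ((b : Int) + ((k' + 1 : Nat) : Int)) :: ps) := by
        intro hmem
        rcases List.mem_cons.mp hmem with h1 | h1
        · push_cast at h1; omega
        · exact hbnot h1
      have e1 : ins (c :: r) b ps = c :: ins r (b + 1) ps := by simp [ins, hbnot]
      have e2 : ins (c :: r) b (((b : Int) + ((k' + 1 : Nat) : Int)) :: ps)
          = c :: ins r (b + 1) (((b : Int) + ((k' + 1 : Nat) : Int)) :: ps) := by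
        simp only [ins]
        rw [if_neg hb1]
      rw [e1, e2]
      simp only [List.take_succ_cons, List.drop_succ_cons, List.cons_append]
      have harg : ((b : Int) + ((k' + 1 : Nat) : Int)) = (((b + 1 : Nat) : Int) + (k' : Nat)) := by
        push_cast; ring
      rw [harg]
      refine congrArg (c :: ·) ?_
      apply ih (b + 1) k' ps
      · intro q hq; have := hqs q hq; push_cast at this ⊢; omega
      · simp only [List.length_cons] at hk; omega

theorem foldr_insAt : ∀ (P : List Int) (t : List Char), P.Pairwise (· < ·) →
    (∀ p ∈ P, 0 ≤ p ∧ p < (t.length : Int)) →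
    P.foldr (fun p t' => insAt t' p) t = ins t 0 P := by
  intro P
  induction P with
  | nil => intro t _ _; simp [ins_nil]
  | cons p ps ih =>
    intro t hpw hbd
    obtain ⟨hhead, htail⟩ := List.pairwise_cons.mp hpw
    simp only [List.foldr_cons]
    rw [ih t htail (fun q hq => hbd q (List.mem_cons_of_mem _ hq))]
    have h0 : 0 ≤ p := (hbd p (by simp)).1
    have hlt : p < (t.length : Int) := (hbd p (by simp)).2
    have harg : (((0 : Nat) : Int) + ((p.toNat : Nat) : Int)) = p := by push_cast; omega
    have hmain := insertAt_ins t 0 p.toNat ps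
      (fun q hq => by have := hhead q hq; push_cast; omega)
      (by omega)
    rw [harg] at hmain
    unfold insAt
    exact hmain

theorem insertBy_front (x : Int) (acc : List Int) (h : ∀ a ∈ acc, a < x) :
    PySem.List.insertBy (fun a b => decide (b < a)) x acc = x :: acc := by
  cases acc with
  | nil => simp [PySem.List.insertBy]
  | cons y ys => simp [PySem.List.insertBy, h y (by simp)]

theorem foldl_insertBy_rev : ∀ (Q acc : List Int), Q.Pairwise (· < ·) →
    (∀ a ∈ acc, ∀ z ∈ Q, a < z) →
    Q.foldl (fun acc x => PySem.List.insertBy (fun a b => decide (b < a)) x acc) acc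
      = Q.reverse ++ acc := by
  intro Q
  induction Q with
  | nil => intro acc _ _; simp
  | cons x Q' ih =>
    intro acc hpw hlt
    obtain ⟨hhead, htail⟩ := List.pairwise_cons.mp hpw
    simp only [List.foldl_cons]
    rw [insertBy_front x acc (fun a ha => hlt a ha x (by simp))]
    rw [ih (x :: acc) htail ?_]
    · simp
    · intro a ha z hz
      rcases List.mem_cons.mp ha with h1 | h1
      · subst h1; exact hhead z hz
      · exact hlt a h1 z (List.mem_cons_of_mem _ hz)

theorem sorted_rev_inc : ∀ (P : List Int), P.Pairwise (· < ·) →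
    PySem.List.sorted P (fun x => x) true = P.reverse := by
  intro P hP
  rw [PySem.List.sorted_rev_eq_foldl_insertBy]
  have : (fun (acc : List Int) (x : Int) =>
      PySem.List.insertBy (fun a b => decide ((fun x => x) b < (fun x => x) a)) x acc)
      = (fun (acc : List Int) (x : Int) =>
      PySem.List.insertBy (fun a b => decide (b < a)) x acc) := rfl
  rw [this, foldl_insertBy_rev P [] hP (by simp)]
  simp

theorem take_one_drop : ∀ (l : List Char) (n : Nat) (h : n < l.length), (l.drop n).take 1 = [l[n]] := by
  intro l
  induction l with
  | nil => intro n h; simp at h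
  | cons c r ih =>
    intro n h
    cases n with
    | zero => rfl
    | succ n' =>
      simp only [List.drop_succ_cons, List.getElem_cons_succ]
      exact ih n' (by simpa using h)

theorem slice_one (cs : List Char) (i : Int) (h0 : 0 ≤ i) (h1 : i < (cs.length : Int)) :
    PySem.List.slice cs (some i) (some (i + 1)) = [PySem.List.pyGetD cs i ' '] := by
  rw [PySem.List.slice_toNat cs h0 (by omega)]
  have hin : i.toNat < cs.length := by omega
  have ht : (i + 1).toNat - i.toNat = 1 := by omega
  rw [ht, PySem.List.pyGetD_eq_getElem cs ' ' h0 h1]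
  exact take_one_drop cs i.toNat hin

theorem bodyA_eq_gP (m : Int) (cs : List Char) (st : Int × List Int) (i : Int)
    (h1 : 1 ≤ i) (h2 : i < (cs.length : Int) - 1) :
    bodyA m cs st i = gP m cs st i := by
  have hs := slice_one cs i (by omega) (by omega)
  by_cases hc : PySem.List.pyGetD cs i ' ' = '\n'
  · simp [bodyA, gP, bodyP, hs, hc, show (0 : Int) < i from by omega, h2]
  · simp [bodyA, gP, bodyP, hs, hc]

theorem gP_zero (m : Int) (cs : List Char) (st : Int × List Int) : gP m cs st 0 = st := by
  simp [gP, bodyP]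

theorem gP_last (m : Int) (cs : List Char) (st : Int × List Int) :
    gP m cs st ((cs.length : Int) - 1) = st := by
  simp [gP, bodyP]

theorem range_extend (m : Int) (cs : List Char) (init : Int × List Int) :
    (PySem.List.pyRange 1 ((cs.length : Int) - 1) 1).foldl (gP m cs) init
      = (PySem.List.pyRange 0 (cs.length : Int) 1).foldl (gP m cs) init := by
  by_cases hlen : 2 ≤ cs.length
  · have e01 : PySem.List.pyRange 0 1 1 = [0] := by
      rw [PySem.List.pyRange_one_cons (by norm_num),
          PySem.List.pyRange_one_eq_nil (by omega)]
    have en : PySem.List.pyRange ((cs.length : Int) - 1) (cs.length : Int) 1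
        = [(cs.length : Int) - 1] := by
      rw [PySem.List.pyRange_one_cons (by omega),
          PySem.List.pyRange_one_eq_nil (by omega)]
    rw [PySem.List.pyRange_one_append 0 1 (cs.length : Int) (by omega) (by omega)]
    rw [PySem.List.pyRange_one_append 1 ((cs.length : Int) - 1) (cs.length : Int)
        (by omega) (by omega)]
    rw [List.foldl_append, List.foldl_append, e01, en]
    simp only [List.foldl_cons, List.foldl_nil]
    rw [gP_zero, gP_last]
  · cases cs with
    | nil =>
      rw [PySem.List.pyRange_one_eq_nil (by norm_num),
          PySem.List.pyRange_one_eq_nil (by norm_num)]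
    | cons c r =>
      cases r with
      | nil =>
        have hn1 : (((c :: ([] : List Char)).length : Int)) = 1 := by norm_num
        rw [hn1]
        rw [PySem.List.pyRange_one_eq_nil (by norm_num)]
        have e01 : PySem.List.pyRange 0 1 1 = [0] := by
          rw [PySem.List.pyRange_one_cons (by norm_num),
              PySem.List.pyRange_one_eq_nil (by omega)]
        rw [e01]
        simp only [List.foldl_cons, List.foldl_nil]
        rw [gP_zero]
      | cons c' r' =>
        exfalso
        apply hlen
        simp only [List.length_cons]
        omega

theorem A_bridge (cs : List Char) (m : Int) :
    (PySem.List.pyRange 1 ((cs.length : Int) - 1) 1).foldl (bodyA m cs) (0, [])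
      = (PySem.List.enumerate cs 0).foldl (bodyP m (cs.length : Int)) (0, []) := by
  have hcongr := PySem.List.foldl_congr_mem
      (PySem.List.pyRange 1 ((cs.length : Int) - 1) 1) (bodyA m cs) (gP m cs) (0, [])
      (fun acc x hx => by
        have hx' := PySem.List.mem_pyRange_one.mp hx
        exact bodyA_eq_gP m cs acc x hx'.1 hx'.2)
  rw [hcongr, range_extend]
  rw [PySem.List.enumerate_eq_map_pyRange cs ' ', List.foldl_map]
  have hlen : PySem.List.len cs = (cs.length : Int) := by simp [PySem.List.len]
  rw [hlen]
  rfl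

theorem paragraph_eq (text : String) (m : Int) : paragraph text m = paragraph_alt text m := by
  simp only [paragraph, paragraph_alt, PySem.Str.len_eq]
  rw [A_bridge text.toList m]
  rw [A_fold m (text.toList.length : Int) (PySem.List.enumerate text.toList 0) 0 []]
  simp only [List.nil_append]
  rw [sorted_rev_inc _ (posF_pairwise m (text.toList.length : Int) text.toList 0 0)]
  have hbounds : ∀ p ∈ posF m (text.toList.length : Int) (PySem.List.enumerate text.toList 0) 0,
      0 ≤ p ∧ p < (text.toList.length : Int) := by
    intro p hp
    constructor
    · have := posF_lb m (text.toList.length : Int) text.toList 0 0 p hp; omega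
    · exact posF_ub m (text.toList.length : Int) _ 0 p hp
  have hsp : (posF m (text.toList.length : Int) (PySem.List.enumerate text.toList 0) 0).reverse.foldl
        spliceA text.toList
      = (posF m (text.toList.length : Int) (PySem.List.enumerate text.toList 0) 0).reverse.foldl
        insAt text.toList := by
    apply PySem.List.foldl_congr_mem
    intro t pos hpos
    have hmem := List.mem_reverse.mp hpos
    have h1 := (hbounds pos hmem).1
    simp [spliceA, insAt, PySem.List.slice_to t h1, PySem.List.slice_from t h1]
  rw [hsp, List.foldl_reverse]
  rw [foldr_insAt _ text.toList (posF_pairwise m (text.toList.length : Int) text.toList 0 0) hbounds]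
  rw [B_fold m (text.toList.length : Int) (PySem.List.enumerate text.toList 0) 0 []]
  simp only [List.nil_append]
  have hgo := go_ins m (text.toList.length : Int) text.toList 0 0 (by push_cast; ring)
  simp only [Nat.cast_zero] at hgo
  rw [hgo]

-- ===== VERDICT (by name: the statement is the Claim_ definition above) =====
theorem paragraph_spec : Claim_equal_paragraph := by
  intro text m _ _
  unfold Spec_paragraph
  exact paragraph_eq text m
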